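-- pv_equiv track=rewrite | github.com/pypi-data/pypi-mirror-403 | packages/escape-sdk/escape_sdk-2.1.1-py3-none-any.whl/escape/_internal/api.py | _parse_signature_params
-- ===== SOURCE A (Python) =====
-- def _parse_signature_params(signature: str) -> list[str]:
--     """Parse JNI signature and extract all parameter types."""
--     params_str = signature[signature.index("(") + 1 : signature.index(")")]
--     if not params_str:
--         return []
--
--     param_types = []
--     i = 0
--     while i < len(params_str):
--         if params_str[i] == "L":
--             # Object type - find semicolon
--             end = params_str.index(";", i)
--             param_types.append(params_str[i : end + 1])
--             i = end + 1
--         elif params_str[i] == "[":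
--             # Array type - consume all array dimensions
--             j = i
--             while j < len(params_str) and params_str[j] == "[":
--                 j += 1
--             if j < len(params_str) and params_str[j] == "L":
--                 end = params_str.index(";", j)
--                 param_types.append(params_str[i : end + 1])
--                 i = end + 1
--             else:
--                 param_types.append(params_str[i : j + 1])
--                 i = j + 1
--         else:
--             # Primitive type - single character
--             param_types.append(params_str[i])
--             i += 1
--
--     return param_types
-- ===== SOURCE B (Python) =====
-- def _parse_one(s, i):
--     """Parse one JNI type token starting at i; return (token, next_index)."""
--     c = s[i]
--     if c == "[":
--         if i + 1 >= len(s):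
--             return "[", i + 1
--         tok, j = _parse_one(s, i + 1)
--         return "[" + tok, j
--     if c == "L":
--         end = s.index(";", i)
--         return s[i : end + 1], end + 1
--     return c, i + 1
--
--
-- def _parse_signature_params(signature: str) -> list[str]:
--     """Parse JNI signature and extract all parameter types."""
--     params_str = signature[signature.index("(") + 1 : signature.index(")")]
--     param_types = []
--     i = 0
--     while i < len(params_str):
--         tok, i = _parse_one(params_str, i)
--         param_types.append(tok)
--     return param_types
-- ===== Notes on version B (the rewrite author's own statement) =====
-- stated objective: alternative
-- what changed: A's flat while-loop with a separate inner bracket-counting loop is replaced by a recursive single-token parser (_parse_one) that handles array types by recursing on the element type, threading (token, next_index) through the main loop.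
-- outside the precondition, e.g. on _parse_signature_params('('): A raises ValueError, B raises ValueError; on _parse_signature_params(')'): A raises ValueError, B raises ValueError; on _parse_signature_params('L'): A raises ValueError, B raises ValueError
import Mathlib
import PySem

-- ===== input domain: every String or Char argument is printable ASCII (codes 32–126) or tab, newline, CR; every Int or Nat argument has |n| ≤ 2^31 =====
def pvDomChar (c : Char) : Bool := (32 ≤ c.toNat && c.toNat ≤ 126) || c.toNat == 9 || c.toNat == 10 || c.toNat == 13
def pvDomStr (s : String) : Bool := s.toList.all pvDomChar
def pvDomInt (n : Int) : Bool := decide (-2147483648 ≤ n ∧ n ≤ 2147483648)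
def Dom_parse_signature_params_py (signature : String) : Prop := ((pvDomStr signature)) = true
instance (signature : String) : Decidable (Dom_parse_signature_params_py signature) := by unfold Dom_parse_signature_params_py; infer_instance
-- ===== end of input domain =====

-- B replaces A's flat scan with inner bracket loop by a recursive one-token parser; alternative decomposition, same cost.

-- ===== PORT A =====
-- A's inner `while j < len and params_str[j] == '['` loop
def pvA_run (p : List Char) (j : Nat) : Nat :=
  if j < p.length then
    if p.getD j ' ' = '[' then pvA_run p (j + 1) else j
  else j
termination_by p.length - j
decreasing_by omega

-- A's main `while i < len(params_str)` loop (fuel = remaining length bound; guard only, same computation)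
def pvA_loop (p : List Char) (fuel i : Nat) (acc : List String) : List String :=
  match fuel with
  | 0 => acc
  | fuel' + 1 =>
    if i < p.length then
      if p.getD i ' ' = 'L' then
        let e := PySem.Chars.findFrom p [';'] (i : Int) none
        if e = -1 then acc  -- params_str.index(';', i) raises ValueError; outside Pre_
        else pvA_loop p fuel' (e.toNat + 1)
               (acc ++ [String.ofList (PySem.List.slice p (some (i : Int)) (some (e + 1)))])
      else if p.getD i ' ' = '[' then
        let j := pvA_run p i
        if j < p.length ∧ p.getD j ' ' = 'L' then
          let e := PySem.Chars.findFrom p [';'] (j : Int) none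
          if e = -1 then acc  -- ValueError; outside Pre_
          else pvA_loop p fuel' (e.toNat + 1)
                 (acc ++ [String.ofList (PySem.List.slice p (some (i : Int)) (some (e + 1)))])
        else pvA_loop p fuel' (j + 1)
               (acc ++ [String.ofList (PySem.List.slice p (some (i : Int)) (some ((j : Int) + 1)))])
      else pvA_loop p fuel' (i + 1) (acc ++ [String.ofList [p.getD i ' ']])
    else acc

def parse_signature_params_py (signature : String) : List String :=
  let s := signature.toList
  let a := PySem.Chars.find s ['(']
  let b := PySem.Chars.find s [')']
  if a = -1 ∨ b = -1 then []  -- signature.index raises ValueError; outside Pre_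
  else
    let p := PySem.List.slice s (some (a + 1)) (some b)
    if p = [] then [] else pvA_loop p p.length 0 []

-- ===== PORT B =====
-- B's recursive `_parse_one(s, i)` returning (token, next_index)
def pvB_one (p : List Char) (i : Nat) : List Char × Nat :=
  if i < p.length then
    if p.getD i ' ' = '[' then
      if p.length ≤ i + 1 then (['['], i + 1)
      else
        let r := pvB_one p (i + 1)
        ('[' :: r.1, r.2)
    else if p.getD i ' ' = 'L' then
      let e := PySem.Chars.findFrom p [';'] (i : Int) none
      if e = -1 then ([], i + 1)  -- s.index(';', i) raises ValueError; outside Pre_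
      else (PySem.List.slice p (some (i : Int)) (some (e + 1)), e.toNat + 1)
    else ([p.getD i ' '], i + 1)
  else ([], i + 1)
termination_by p.length - i
decreasing_by omega

-- B's main `while i < len(params_str)` loop
def pvB_loop (p : List Char) (fuel i : Nat) (acc : List String) : List String :=
  match fuel with
  | 0 => acc
  | fuel' + 1 =>
    if i < p.length then
      let r := pvB_one p i
      pvB_loop p fuel' r.2 (acc ++ [String.ofList r.1])
    else acc

def parse_signature_params_py_alt (signature : String) : List String :=
  let s := signature.toList
  let a := PySem.Chars.find s ['(']
  let b := PySem.Chars.find s [')']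
  if a = -1 ∨ b = -1 then []  -- ValueError; outside Pre_
  else
    let p := PySem.List.slice s (some (a + 1)) (some b)
    pvB_loop p p.length 0 []

-- ===== PRECONDITION & SPEC =====
-- Pre_ excludes exactly the inputs where Python A raises ValueError: a signature without '(' or
-- without ')', or whose parameter substring contains an 'L' with no ';' at or after it.
def Pre_parse_signature_params_py (signature : String) : Prop :=
  let s := signature.toList
  let p := PySem.List.slice s (some (PySem.Chars.find s ['('] + 1)) (some (PySem.Chars.find s [')']))
  '(' ∈ s ∧ ')' ∈ s ∧
  (∀ k : Nat, k < p.length → p.getD k ' ' = 'L' → ';' ∈ p.drop k)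
instance (signature : String) : Decidable (Pre_parse_signature_params_py signature) := by
  unfold Pre_parse_signature_params_py; infer_instance

def pvWitness_parse_signature_params_py : String := "(ILjava/lang/String;[[I)V"

def Spec_parse_signature_params_py (signature : String) (out : List String) : Prop := out = parse_signature_params_py_alt signature
instance (signature : String) (out : List String) : Decidable (Spec_parse_signature_params_py signature out) := by unfold Spec_parse_signature_params_py; infer_instance

-- ===== CLAIM (what is proved, stated in full; the proofs are below) =====
def Claim_equal_parse_signature_params_py : Prop := ∀ (signature : String), Dom_parse_signature_params_py signature → Pre_parse_signature_params_py signature → Spec_parse_signature_params_py signature (parse_signature_params_py signature)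

-- ===== LEMMAS AND PROOFS =====
-- the no-crash condition on the parameter substring, as a predicate for the loop lemmas
def pvLcond (p : List Char) : Prop :=
  ∀ k : Nat, k < p.length → p.getD k ' ' = 'L' → ';' ∈ p.drop k

-- slice with Nat bounds, the common currency of the lemmas
def pvSlice (p : List Char) (i b : Nat) : List Char :=
  PySem.List.slice p (some (i : Int)) (some (b : Int))

lemma pvSlice_cast (p : List Char) (i b : Nat) :
    PySem.List.slice p (some (i : Int)) (some ((b : Int) + 1)) = pvSlice p i (b + 1) := by
  unfold pvSlice; push_cast; rfl

lemma pv_findFrom_semi (p : List Char) (k : Nat) (hk : k < p.length) (hs : ';' ∈ p.drop k) :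
    ∃ e : Nat, PySem.Chars.findFrom p [';'] (k : Int) none = (e : Int) ∧ k ≤ e := by
  have hk' : k ≤ p.length := le_of_lt hk
  have hinf : [';'] <:+: p.drop k := by
    obtain ⟨l1, l2, h12⟩ := List.append_of_mem hs
    exact ⟨l1, l2, by simp [h12]⟩
  have hne : PySem.Chars.findFrom p [';'] (k : Int) none ≠ -1 := by
    simp only [ne_eq, PySem.Chars.findFrom_natCast_eq_neg_one_iff p [';'] k hk']
    simp [hinf]
  obtain ⟨hle, -, -⟩ := PySem.Chars.findFrom_natCast_spec p [';'] k hk' hne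
  refine ⟨(PySem.Chars.findFrom p [';'] (k : Int) none).toNat, by omega, by omega⟩

lemma pvA_run_ge (p : List Char) : ∀ j, j ≤ pvA_run p j := by
  intro j
  induction j using pvA_run.induct p with
  | case1 j hj hb ih => rw [pvA_run]; simp only [hj, if_true, hb]; omega
  | case2 j hj hb => rw [pvA_run]; simp only [hj, if_true, if_neg hb]; omega
  | case3 j hj => rw [pvA_run]; simp only [hj, if_false]; omega

lemma pvA_run_step (p : List Char) (j : Nat) (hj : j < p.length) (hb : p.getD j ' ' = '[') :
    pvA_run p j = pvA_run p (j + 1) := by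
  rw [pvA_run]; simp only [hj, if_true, hb]

lemma pvA_run_stop (p : List Char) (j : Nat) (h : ¬(j < p.length ∧ p.getD j ' ' = '[')) :
    pvA_run p j = j := by
  rw [pvA_run]
  by_cases hj : j < p.length
  · have hb : ¬ p.getD j ' ' = '[' := fun hb => h ⟨hj, hb⟩
    simp only [hj, if_true, if_neg hb]
  · simp only [hj, if_false]

lemma pv_cons_slice (p : List Char) (i b : Nat) (h : i < p.length) (hb : i + 1 ≤ b) :
    pvSlice p i b = p.getD i ' ' :: pvSlice p (i + 1) b := by
  unfold pvSlice
  rw [PySem.List.slice_natCast, PySem.List.slice_natCast]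
  rw [List.drop_eq_getElem_cons h]
  have hsplit : b - i = (b - (i + 1)) + 1 := by omega
  rw [hsplit, List.take_succ_cons, List.getD_eq_getElem p ' ' h]

lemma pv_slice_nil (p : List Char) (i b : Nat) (h : p.length ≤ i) : pvSlice p i b = [] := by
  unfold pvSlice
  rw [PySem.List.slice_natCast, List.drop_eq_nil_of_le h, List.take_nil]

lemma pv_slice_le (p : List Char) (i b : Nat) (h : b ≤ i) : pvSlice p i b = [] := by
  unfold pvSlice
  rw [PySem.List.slice_natCast, Nat.sub_eq_zero_of_le h, List.take_zero]

-- step lemmas for pvB_one (conditions in getD form, so simp cannot disturb them)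
lemma pvB_one_prim (p : List Char) (i : Nat) (hi : i < p.length)
    (h1 : ¬ p.getD i ' ' = '[') (h2 : ¬ p.getD i ' ' = 'L') :
    pvB_one p i = ([p.getD i ' '], i + 1) := by
  rw [pvB_one]
  simp only [hi, if_true, if_neg h1, if_neg h2]

lemma pvB_one_L (p : List Char) (i e : Nat) (hi : i < p.length)
    (h1 : ¬ p.getD i ' ' = '[') (h2 : p.getD i ' ' = 'L')
    (he : PySem.Chars.findFrom p [';'] (i : Int) none = (e : Int)) :
    pvB_one p i = (pvSlice p i (e + 1), e + 1) := by
  rw [pvB_one]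
  simp only [hi, if_true, if_neg h1, h2, he, if_pos rfl]
  rw [if_neg (by omega : ¬ ((e : Int) = -1))]
  rw [pvSlice_cast]
  simp

lemma pvB_one_brEnd (p : List Char) (i : Nat) (hi : i < p.length)
    (hb : p.getD i ' ' = '[') (hend : p.length ≤ i + 1) :
    pvB_one p i = (['['], i + 1) := by
  rw [pvB_one]
  simp only [hi, if_true, hb, if_pos rfl, hend]

lemma pvB_one_brRec (p : List Char) (i : Nat) (hi : i < p.length)
    (hb : p.getD i ' ' = '[') (hlt : i + 1 < p.length) :
    pvB_one p i = ('[' :: (pvB_one p (i + 1)).1, (pvB_one p (i + 1)).2) := by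
  rw [pvB_one]
  simp only [hi, if_true, hb, if_pos rfl, if_neg (by omega : ¬ (p.length ≤ i + 1))]

-- characterization of B's one-token parser on a '[' in terms of A's bracket run
lemma pvB_one_bracket (p : List Char) (hc : pvLcond p) :
    ∀ n i, p.length - i ≤ n → i < p.length → p.getD i ' ' = '[' →
    ((pvA_run p (i + 1) < p.length ∧ p.getD (pvA_run p (i + 1)) ' ' = 'L' →
        ∃ e : Nat, PySem.Chars.findFrom p [';'] ((pvA_run p (i + 1) : Nat) : Int) none = (e : Int) ∧
          pvA_run p (i + 1) ≤ e ∧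
          pvB_one p i = (pvSlice p i (e + 1), e + 1)) ∧
     (pvA_run p (i + 1) < p.length ∧ ¬ p.getD (pvA_run p (i + 1)) ' ' = 'L' →
        pvB_one p i = (pvSlice p i (pvA_run p (i + 1) + 1), pvA_run p (i + 1) + 1)) ∧
     (p.length ≤ pvA_run p (i + 1) →
        pvB_one p i = (pvSlice p i (pvA_run p (i + 1) + 1), pvA_run p (i + 1)))) := by
  intro n
  induction n with
  | zero => intro i hn hi hb; omega
  | succ n ih =>
    intro i hn hi hb
    by_cases hend : p.length ≤ i + 1
    · -- i is the last index: B returns (['['], i+1); the run stops at i+1 = p.length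
      have hrun : pvA_run p (i + 1) = i + 1 := pvA_run_stop p (i + 1) (by omega)
      refine ⟨fun h1 => absurd h1.1 (by omega), fun h1 => absurd h1.1 (by omega), fun _ => ?_⟩
      rw [pvB_one_brEnd p i hi hb hend, hrun,
          pv_cons_slice p i (i + 1 + 1) hi (by omega), hb,
          pv_slice_nil p (i + 1) (i + 1 + 1) hend]
    · -- i+1 < p.length : B recurses on the element type at i+1
      have hi1 : i + 1 < p.length := by omega
      have hBone := pvB_one_brRec p i hi hb hi1
      by_cases hb1 : p.getD (i + 1) ' ' = '['
      · -- another '[': the run continues; apply the induction hypothesis at i+1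
        have hrun : pvA_run p (i + 1) = pvA_run p (i + 1 + 1) := pvA_run_step p (i + 1) hi1 hb1
        obtain ⟨c1, c2, c3⟩ := ih (i + 1) (by omega) hi1 hb1
        have hge2 := pvA_run_ge p (i + 1 + 1)
        rw [hrun]
        refine ⟨?_, ?_, ?_⟩
        · intro h1
          obtain ⟨e, he, hle, hone⟩ := c1 h1
          refine ⟨e, he, by omega, ?_⟩
          rw [hBone, hone]
          rw [pv_cons_slice p i (e + 1) hi (by omega), hb]
        · intro h1
          rw [hBone, c2 h1]
          rw [pv_cons_slice p i (pvA_run p (i + 1 + 1) + 1) hi (by omega), hb]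
        · intro h1
          rw [hBone, c3 h1]
          rw [pv_cons_slice p i (pvA_run p (i + 1 + 1) + 1) hi (by omega), hb]
      · -- the run stops at i+1
        have hrun : pvA_run p (i + 1) = i + 1 := pvA_run_stop p (i + 1) (fun h => hb1 h.2)
        rw [hrun]
        refine ⟨?_, ?_, fun h1 => absurd h1 (by omega)⟩
        · intro ⟨_, h2⟩
          obtain ⟨e, he, hle⟩ := pv_findFrom_semi p (i + 1) hi1 (hc (i + 1) hi1 h2)
          have hone := pvB_one_L p (i + 1) e hi1 (by rw [h2]; decide) h2 he
          refine ⟨e, he, by omega, ?_⟩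
          rw [hBone, hone]
          rw [pv_cons_slice p i (e + 1) hi (by omega), hb]
        · intro ⟨_, h2⟩
          have hone := pvB_one_prim p (i + 1) hi1 hb1 h2
          rw [hBone, hone]
          rw [pv_cons_slice p i (i + 1 + 1) hi (by omega), hb,
              pv_cons_slice p (i + 1) (i + 1 + 1) hi1 (by omega),
              pv_slice_le p (i + 1 + 1) (i + 1 + 1) (by omega)]
  -- end

-- step lemmas for A's loop
lemma pvA_loop_L (p : List Char) (f i e : Nat) (acc : List String) (hi : i < p.length)
    (hL : p.getD i ' ' = 'L')
    (he : PySem.Chars.findFrom p [';'] (i : Int) none = (e : Int)) :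
    pvA_loop p (f + 1) i acc = pvA_loop p f (e + 1) (acc ++ [String.ofList (pvSlice p i (e + 1))]) := by
  rw [pvA_loop]
  simp only [hi, if_true, hL, if_pos rfl, he]
  rw [if_neg (by omega : ¬ ((e : Int) = -1))]
  rw [pvSlice_cast]
  simp

lemma pvA_loop_brL (p : List Char) (f i e : Nat) (acc : List String) (hi : i < p.length)
    (hb : p.getD i ' ' = '[') (hnL : ¬ p.getD i ' ' = 'L')
    (hj : pvA_run p i < p.length ∧ p.getD (pvA_run p i) ' ' = 'L')
    (he : PySem.Chars.findFrom p [';'] ((pvA_run p i : Nat) : Int) none = (e : Int)) :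
    pvA_loop p (f + 1) i acc = pvA_loop p f (e + 1) (acc ++ [String.ofList (pvSlice p i (e + 1))]) := by
  rw [pvA_loop]
  simp only [hi, if_true, if_neg hnL, hb, if_pos rfl, if_pos hj, he]
  rw [if_neg (by omega : ¬ ((e : Int) = -1))]
  rw [pvSlice_cast]
  simp

lemma pvA_loop_brP (p : List Char) (f i : Nat) (acc : List String) (hi : i < p.length)
    (hb : p.getD i ' ' = '[') (hnL : ¬ p.getD i ' ' = 'L')
    (hj : ¬ (pvA_run p i < p.length ∧ p.getD (pvA_run p i) ' ' = 'L')) :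
    pvA_loop p (f + 1) i acc
      = pvA_loop p f (pvA_run p i + 1) (acc ++ [String.ofList (pvSlice p i (pvA_run p i + 1))]) := by
  rw [pvA_loop]
  simp only [hi, if_true, if_neg hnL]
  simp only [hb, if_pos rfl, if_neg hj, if_true]
  rw [pvSlice_cast]

lemma pvA_loop_prim (p : List Char) (f i : Nat) (acc : List String) (hi : i < p.length)
    (hb : ¬ p.getD i ' ' = '[') (hnL : ¬ p.getD i ' ' = 'L') :
    pvA_loop p (f + 1) i acc = pvA_loop p f (i + 1) (acc ++ [String.ofList [p.getD i ' ']]) := by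
  rw [pvA_loop]
  simp only [hi, if_true, if_neg hnL, if_neg hb]

lemma pvA_loop_stop (p : List Char) (fuel i : Nat) (acc : List String) (h : p.length ≤ i) :
    pvA_loop p fuel i acc = acc := by
  cases fuel with
  | zero => rfl
  | succ f => rw [pvA_loop]; simp only [if_neg (by omega : ¬ i < p.length)]

lemma pvB_loop_stop (p : List Char) (fuel i : Nat) (acc : List String) (h : p.length ≤ i) :
    pvB_loop p fuel i acc = acc := by
  cases fuel with
  | zero => rfl
  | succ f => rw [pvB_loop]; simp only [if_neg (by omega : ¬ i < p.length)]

lemma pvB_loop_step (p : List Char) (f i : Nat) (acc : List String) (hi : i < p.length) :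
    pvB_loop p (f + 1) i acc = pvB_loop p f (pvB_one p i).2 (acc ++ [String.ofList (pvB_one p i).1]) := by
  rw [pvB_loop]; simp only [hi, if_true]

lemma pv_loops_eq (p : List Char) (hc : pvLcond p) :
    ∀ fuel i acc, pvA_loop p fuel i acc = pvB_loop p fuel i acc := by
  intro fuel
  induction fuel with
  | zero => intro i acc; rfl
  | succ f ih =>
    intro i acc
    by_cases hi : i < p.length
    · rw [pvB_loop_step p f i acc hi]
      by_cases hL : p.getD i ' ' = 'L'
      · obtain ⟨e, he, hle⟩ := pv_findFrom_semi p i hi (hc i hi hL)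
        rw [pvA_loop_L p f i e acc hi hL he,
            pvB_one_L p i e hi (by rw [hL]; decide) hL he]
        exact ih (e + 1) _
      · by_cases hB : p.getD i ' ' = '['
        · have hrun0 : pvA_run p i = pvA_run p (i + 1) := pvA_run_step p i hi hB
          obtain ⟨c1, c2, c3⟩ := pvB_one_bracket p hc (p.length - i) i (le_refl _) hi hB
          by_cases hj : pvA_run p (i + 1) < p.length ∧ p.getD (pvA_run p (i + 1)) ' ' = 'L'
          · obtain ⟨e, he, hle, hone⟩ := c1 hj
            rw [pvA_loop_brL p f i e acc hi hB hL (by rw [hrun0]; exact hj) (by rw [hrun0]; exact he),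
                hone]
            exact ih (e + 1) _
          · by_cases hlen : pvA_run p (i + 1) < p.length
            · have h2 : ¬ p.getD (pvA_run p (i + 1)) ' ' = 'L' := fun h => hj ⟨hlen, h⟩
              have hone := c2 ⟨hlen, h2⟩
              rw [pvA_loop_brP p f i acc hi hB hL (by rw [hrun0]; exact hj), hone, hrun0]
              exact ih (pvA_run p (i + 1) + 1) _
            · have hge : p.length ≤ pvA_run p (i + 1) := by omega
              have hone := c3 hge
              rw [pvA_loop_brP p f i acc hi hB hL (by rw [hrun0]; exact hj), hone, hrun0]
              rw [pvA_loop_stop p f (pvA_run p (i + 1) + 1) _ (by omega),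
                  pvB_loop_stop p f (pvA_run p (i + 1)) _ hge]
        · rw [pvA_loop_prim p f i acc hi hB hL, pvB_one_prim p i hi hB hL]
          exact ih (i + 1) _
    · rw [pvA_loop_stop p (f + 1) i acc (by omega), pvB_loop_stop p (f + 1) i acc (by omega)]

-- ===== VERDICT (by name: the statement is the Claim_ definition above) =====
theorem parse_signature_params_py_spec : Claim_equal_parse_signature_params_py := by
  intro signature _ hpre
  unfold Spec_parse_signature_params_py
  unfold parse_signature_params_py parse_signature_params_py_alt
  obtain ⟨hop, hcp, hL⟩ := hpre
  have ha : ¬ PySem.Chars.find signature.toList ['('] = -1 := by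
    rw [← ne_eq, PySem.Chars.find_ne_neg_one_iff]
    obtain ⟨l1, l2, h12⟩ := List.append_of_mem hop
    exact ⟨l1, l2, by simp [h12]⟩
  have hb : ¬ PySem.Chars.find signature.toList [')'] = -1 := by
    rw [← ne_eq, PySem.Chars.find_ne_neg_one_iff]
    obtain ⟨l1, l2, h12⟩ := List.append_of_mem hcp
    exact ⟨l1, l2, by simp [h12]⟩
  simp only [ha, hb, or_self, if_false]
  set p := PySem.List.slice signature.toList
    (some (PySem.Chars.find signature.toList ['('] + 1))
    (some (PySem.Chars.find signature.toList [')'])) with hp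
  by_cases hnil : p = []
  · rw [if_pos hnil, hnil]
    rfl
  · rw [if_neg hnil]
    exact pv_loops_eq p hL p.length 0 []
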